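-- pv_equiv track=rewrite | github.com/Fluffy-phd/advent_of_code | 2023/OK_day07/main.py | alter_code
-- ===== SOURCE A (Python) =====
-- def alter_code(code, code_map):
--
--     out = 0
--     a = 1
--     for i in range(len(code)):
--         c = code_map[code[len(code) - i - 1]]
--         out += a * c
--         a *= 13
--
--     return out
-- ===== SOURCE B (Python) =====
-- def alter_code(code, code_map):
--     out = 0
--     for c in code:
--         out = out * 13 + code_map[c]
--     return out
-- ===== Notes on version B (the rewrite author's own statement) =====
-- stated objective: idiomatic
-- what changed: Replaces the reversed-index weighted sum with its power accumulator by a single forward Horner pass (out = out*13 + digit), eliminating the power variable and index arithmetic.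
import Mathlib
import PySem

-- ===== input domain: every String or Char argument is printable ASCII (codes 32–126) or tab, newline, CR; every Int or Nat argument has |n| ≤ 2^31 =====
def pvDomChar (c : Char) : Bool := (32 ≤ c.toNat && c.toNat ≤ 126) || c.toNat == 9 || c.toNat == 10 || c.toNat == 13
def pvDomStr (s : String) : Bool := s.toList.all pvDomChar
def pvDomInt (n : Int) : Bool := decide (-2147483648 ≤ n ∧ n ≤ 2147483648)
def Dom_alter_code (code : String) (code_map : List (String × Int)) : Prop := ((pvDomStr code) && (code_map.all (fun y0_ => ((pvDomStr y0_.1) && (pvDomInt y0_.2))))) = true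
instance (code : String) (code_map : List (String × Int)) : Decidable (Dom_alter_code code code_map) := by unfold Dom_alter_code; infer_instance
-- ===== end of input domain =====

-- B replaces A's reversed-index weighted sum (explicit power accumulator) by a forward Horner pass; idiomatic, same cost.

-- dict lookup (first match, insertion order); Pre_ guarantees it succeeds (no KeyError)
def pvLookup (m : List (String × Int)) (k : String) : Option Int :=
  (m.find? (fun p => p.1 == k)).map (fun p => p.2)

-- ===== PORT A =====
def alter_code (code : String) (code_map : List (String × Int)) : Int :=
  -- out=0, a=1; for i in range(len(code)): c = code_map[code[len(code)-i-1]] (index always in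
  -- range; KeyError excluded by Pre_); out += a*c; a *= 13; return out
  ((PySem.List.pyRange 0 (code.toList.length : Int) 1).foldl
    (fun (s : Int × Int) i =>
      (s.1 + s.2 * (pvLookup code_map (String.ofList
          [(PySem.List.pyGet? code.toList ((code.toList.length : Int) - i - 1)).getD ' '])).getD 0,
       s.2 * 13)) (0, 1)).1

-- ===== PORT B =====
def alter_code_alt (code : String) (code_map : List (String × Int)) : Int :=
  code.toList.foldl (fun out ch => out * 13 + (pvLookup code_map (String.ofList [ch])).getD 0) 0

-- ===== PRECONDITION & SPEC =====
-- Pre_ excludes exactly the inputs on which Python A raises KeyError: a character of code absent from code_map.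
def Pre_alter_code (code : String) (code_map : List (String × Int)) : Prop :=
  (code.toList.all (fun ch => code_map.any (fun p => p.1 == String.ofList [ch]))) = true
instance (code : String) (code_map : List (String × Int)) : Decidable (Pre_alter_code code code_map) := by unfold Pre_alter_code; infer_instance
def pvWitness_alter_code : String × (List (String × Int)) := ("ab", [("a", 1), ("b", 2)])

def Spec_alter_code (code : String) (code_map : List (String × Int)) (out : Int) : Prop := out = alter_code_alt code code_map
instance (code : String) (code_map : List (String × Int)) (out : Int) : Decidable (Spec_alter_code code code_map out) := by unfold Spec_alter_code; infer_instance

-- ===== CLAIM (what is proved, stated in full; the proofs are below) =====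
def Claim_equal_alter_code : Prop := ∀ (code : String) (code_map : List (String × Int)), Dom_alter_code code code_map → Pre_alter_code code code_map → Spec_alter_code code code_map (alter_code code code_map)

-- ===== LEMMAS AND PROOFS =====

-- Horner with arbitrary start value
theorem pv_horner_shift (v : Char → Int) (cs : List Char) (x : Int) :
    cs.foldl (fun o c => o * 13 + v c) x
      = x * 13 ^ cs.length + cs.foldl (fun o c => o * 13 + v c) 0 := by
  induction cs generalizing x with
  | nil => simp
  | cons c t ih =>
    simp only [List.foldl_cons, List.length_cons]
    rw [ih (x * 13 + v c), ih (0 * 13 + v c)]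
    ring

-- A's reversed-index loop computes o + a * Horner
theorem pv_loopA (v : Char → Int) (cs : List Char) (o a : Int) :
    (PySem.List.pyRange 0 (cs.length : Int) 1).foldl
        (fun (s : Int × Int) i =>
          (s.1 + s.2 * v ((PySem.List.pyGet? cs ((cs.length : Int) - i - 1)).getD ' '),
           s.2 * 13)) (o, a)
      = (o + a * cs.foldl (fun o c => o * 13 + v c) 0, a * 13 ^ cs.length) := by
  induction cs generalizing o a with
  | nil => simp
  | cons c t ih =>
    have hn : (0 : Int) ≤ (t.length : Int) := by positivity
    have hsplit : PySem.List.pyRange 0 (((c :: t).length : Int)) 1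
        = PySem.List.pyRange 0 (t.length : Int) 1 ++ [(t.length : Int)] := by
      have := PySem.List.pyRange_one_succ_right (a := 0) (b := (t.length : Int)) hn
      simpa using this
    rw [hsplit, List.foldl_append]
    have hcongr :
        (PySem.List.pyRange 0 (t.length : Int) 1).foldl
          (fun (s : Int × Int) i =>
            (s.1 + s.2 * v ((PySem.List.pyGet? (c :: t) (((c :: t).length : Int) - i - 1)).getD ' '),
             s.2 * 13)) (o, a)
        = (PySem.List.pyRange 0 (t.length : Int) 1).foldl
          (fun (s : Int × Int) i =>
            (s.1 + s.2 * v ((PySem.List.pyGet? t ((t.length : Int) - i - 1)).getD ' '),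
             s.2 * 13)) (o, a) := by
      apply PySem.List.foldl_congr_mem
      intro acc i hi
      have hib := (PySem.List.mem_pyRange_one).mp hi
      have hidx : PySem.List.pyGet? (c :: t) (((c :: t).length : Int) - i - 1)
          = PySem.List.pyGet? t ((t.length : Int) - i - 1) := by
        have h1 : (0 : Int) ≤ (t.length : Int) - i - 1 := by omega
        have h2 : (0 : Int) ≤ ((c :: t).length : Int) - i - 1 := by
          simp only [List.length_cons]; push_cast; omega
        rw [PySem.List.pyGet?_of_nonneg _ h2, PySem.List.pyGet?_of_nonneg _ h1]
        have hk : (((c :: t).length : Int) - i - 1).toNat = ((t.length : Int) - i - 1).toNat + 1 := by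
          simp only [List.length_cons]; push_cast; omega
        rw [hk]
        simp
      rw [hidx]
    rw [hcongr, ih]
    -- last iteration reads (c :: t)[0] = c
    have hz : ((((t.length + 1 : Nat)) : Int) - (t.length : Int) - 1) = 0 := by push_cast; omega
    simp only [List.foldl_cons, List.foldl_nil, List.length_cons, hz,
      PySem.List.pyGet?_zero_cons, Option.getD_some]
    rw [pv_horner_shift v t (0 * 13 + v c)]
    simp only [Prod.mk.injEq]
    constructor
    · ring
    · ring

-- ===== VERDICT (by name: the statement is the Claim_ definition above) =====
theorem alter_code_spec : Claim_equal_alter_code := by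
  intro code code_map _ _
  show alter_code code code_map = alter_code_alt code code_map
  unfold alter_code alter_code_alt
  rw [pv_loopA (fun ch => (pvLookup code_map (String.ofList [ch])).getD 0) code.toList 0 1]
  simp
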